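-- pv_equiv track=rewrite | github.com/kr-shrinivasa/DSA | 169_both_x.py | bothCountX
-- ===== SOURCE A (Python) =====
-- from collections import Counter
--
-- def bothCountX(string1, string2, x):
--
--     d1=Counter(string1)
--     d2=Counter(string2)
--     arr=[]
--     for i in d1:
--         if d1[i]==x and d2[i]==x:
--             if 97<=ord(i)<=122:
--                 arr.append(i)
--     arr.sort()
--     return arr
-- ===== SOURCE B (Python) =====
-- def bothCountX(string1, string2, x):
--     # Sort-and-scan: sort each string, collect (by scanning runs) the lowercase
--     # chars whose run length equals x, then merge-intersect the two ascending lists.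
--     def runs_x(t):
--         out = []
--         while t:
--             c = t[0]
--             k = 1
--             while k < len(t) and t[k] == c:
--                 k += 1
--             if k == x and 'a' <= c <= 'z':
--                 out.append(c)
--             t = t[k:]
--         return out
--     r1 = runs_x(sorted(string1))
--     r2 = runs_x(sorted(string2))
--     res = []
--     i = j = 0
--     while i < len(r1) and j < len(r2):
--         if r1[i] == r2[j]:
--             res.append(r1[i])
--             i += 1
--             j += 1
--         elif r1[i] < r2[j]:
--             i += 1
--         else:
--             j += 1
--     return res
-- ===== Notes on version B (the rewrite author's own statement) =====
-- stated objective: alternative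
-- what changed: Replaces A's two Counter hash tables, key loop and final sort by a sort-then-scan strategy: sort each string, collect via a run-length scan of each sorted list the lowercase chars whose run length equals x, and intersect the two ascending result lists with a two-pointer merge (no dictionaries and no final sort; the output is produced already in order).
import Mathlib
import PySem

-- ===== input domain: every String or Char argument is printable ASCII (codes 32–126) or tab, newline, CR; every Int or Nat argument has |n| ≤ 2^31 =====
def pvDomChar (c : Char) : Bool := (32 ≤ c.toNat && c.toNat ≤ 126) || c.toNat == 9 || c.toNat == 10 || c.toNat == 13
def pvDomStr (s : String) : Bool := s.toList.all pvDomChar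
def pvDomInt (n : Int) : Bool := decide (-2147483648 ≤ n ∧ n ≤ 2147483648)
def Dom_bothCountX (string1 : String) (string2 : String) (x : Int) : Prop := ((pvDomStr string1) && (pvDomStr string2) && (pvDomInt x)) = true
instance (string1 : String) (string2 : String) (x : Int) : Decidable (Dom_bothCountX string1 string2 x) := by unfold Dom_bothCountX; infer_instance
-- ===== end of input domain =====

-- B drops A's Counter tables entirely: it sorts each string, scans the runs of the sorted
-- lists for lowercase chars whose run length is x, and merge-intersects the two ascending
-- results with two pointers (no dictionaries, no final sort); same return value.

-- ===== PORT A =====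
-- d1 = Counter(string1); d2 = Counter(string2); loop over d1's keys appending i when
-- d1[i] == x == d2[i] and 97 <= ord(i) <= 122; arr.sort().
def bothCountX (string1 : String) (string2 : String) (x : Int) : List String :=
  let d1 := PySem.Dict.counter string1.toList
  let d2 := PySem.Dict.counter string2.toList
  let arr := d1.keys.foldl (fun arr i =>
    if d1.getD i 0 = x ∧ d2.getD i 0 = x then
      if 97 ≤ (i.toNat : Int) ∧ (i.toNat : Int) ≤ 122 then arr ++ [String.ofList [i]] else arr
    else arr) ([] : List String)
  PySem.List.sorted arr (fun s => s) false

-- ===== PORT B =====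
-- runs_x(t): while t: c = t[0]; count the run of c at the front (k), keep c when
-- k == x and 'a' <= c <= 'z', continue with the rest t[k:].  The inner index loop
-- counting the run is the takeWhile length; t[k:] is the matching dropWhile.
def pvRunsX (x : Int) : List Char → List Char
  | [] => []
  | c :: rest =>
      let k : Nat := 1 + (rest.takeWhile (fun d => d == c)).length
      (if (k : Int) = x ∧ 'a' ≤ c ∧ c ≤ 'z' then [c] else [])
        ++ pvRunsX x (rest.dropWhile (fun d => d == c))
termination_by t => t.length
decreasing_by
  have := List.length_dropWhile_le (fun d => d == c) rest
  simp; omega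

-- the two-pointer while loop over i, j intersecting the two ascending lists
def pvMergeInter : List Char → List Char → List Char
  | [], _ => []
  | _ :: _, [] => []
  | a :: as, b :: bs =>
      if a = b then a :: pvMergeInter as bs
      else if a < b then pvMergeInter as (b :: bs)
      else pvMergeInter (a :: as) bs
termination_by xs ys => xs.length + ys.length

def bothCountX_alt (string1 : String) (string2 : String) (x : Int) : List String :=
  let r1 := pvRunsX x (PySem.List.sorted string1.toList (fun c => c) false)
  let r2 := pvRunsX x (PySem.List.sorted string2.toList (fun c => c) false)
  (pvMergeInter r1 r2).map (fun c => String.ofList [c])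

-- ===== PRECONDITION & SPEC =====
def Spec_bothCountX (string1 : String) (string2 : String) (x : Int) (out : List String) : Prop := out = bothCountX_alt string1 string2 x
instance (string1 : String) (string2 : String) (x : Int) (out : List String) : Decidable (Spec_bothCountX string1 string2 x out) := by unfold Spec_bothCountX; infer_instance

-- ===== CLAIM (what is proved, stated in full; the proofs are below) =====
def Claim_equal_bothCountX : Prop := ∀ (string1 : String) (string2 : String) (x : Int), Dom_bothCountX string1 string2 x → Spec_bothCountX string1 string2 x (bothCountX string1 string2 x)

-- ===== LEMMAS AND PROOFS =====

-- A's append loop (two nested ifs) is a filter-and-map over the key list.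
theorem pvFoldA (P Q : Char → Prop) [DecidablePred P] [DecidablePred Q]
    (l : List Char) (acc : List String) :
    l.foldl (fun arr i =>
      if P i then (if Q i then arr ++ [String.ofList [i]] else arr) else arr) acc
    = acc ++ (l.filter (fun i => decide (P i) && decide (Q i))).map (fun i => String.ofList [i]) := by
  induction l generalizing acc with
  | nil => simp
  | cons h t ih =>
    simp only [List.foldl_cons, List.filter_cons]
    by_cases hp : P h <;> by_cases hq : Q h <;> simp [hp, hq, ih]

-- 'a' <= c <= 'z' on Char is exactly 97 <= ord(c) <= 122.
theorem pvCharLe (c : Char) : ('a' ≤ c ∧ c ≤ 'z') ↔ (97 ≤ (c.toNat : Int) ∧ (c.toNat : Int) ≤ 122) := by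
  constructor
  · rintro ⟨h1, h2⟩
    rw [Char.le_def, UInt32.le_iff_toNat_le] at h1 h2
    constructor <;> [exact_mod_cast h1; exact_mod_cast h2]
  · rintro ⟨h1, h2⟩
    rw [Char.le_def, Char.le_def, UInt32.le_iff_toNat_le, UInt32.le_iff_toNat_le]
    constructor <;> [exact_mod_cast h1; exact_mod_cast h2]

-- in a sorted list with all elements ≥ a, everything surviving dropWhile (== a) is > a
theorem pvDropGt (a : Char) (rest : List Char) (hs : rest.Pairwise (· ≤ ·))
    (hge : ∀ d ∈ rest, a ≤ d) :
    ∀ d ∈ rest.dropWhile (fun d => d == a), a < d := by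
  induction rest with
  | nil => simp [List.dropWhile]
  | cons r rs ih =>
    rw [List.pairwise_cons] at hs
    by_cases hr : r = a
    · rw [List.dropWhile_cons_of_pos (by simp [hr])]
      exact ih hs.2 (fun d hd => hge d (List.mem_cons_of_mem _ hd))
    · rw [List.dropWhile_cons_of_neg (by simp [hr])]
      intro d hd
      rcases List.mem_cons.mp hd with h | h
      · subst h; exact lt_of_le_of_ne (hge d List.mem_cons_self) (Ne.symm hr)
      · exact lt_of_lt_of_le
          (lt_of_le_of_ne (hge r List.mem_cons_self) (Ne.symm hr)) (hs.1 d h)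

-- membership in pvRunsX over a sorted list: the front run length is the count
theorem pvRunsMem (x : Int) (t : List Char) (hs : t.Pairwise (· ≤ ·)) (c : Char) :
    c ∈ pvRunsX x t ↔ c ∈ t ∧ (t.count c : Int) = x ∧ 'a' ≤ c ∧ c ≤ 'z' := by
  induction t using pvRunsX.induct with
  | case1 => simp [pvRunsX]
  | case2 a rest ih =>
    rw [List.pairwise_cons] at hs
    have hge : ∀ d ∈ rest, a ≤ d := hs.1
    have hgt := pvDropGt a rest hs.2 hge
    have hdw : (rest.dropWhile (fun d => d == a)).Pairwise (· ≤ ·) :=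
      hs.2.sublist (List.dropWhile_sublist _)
    have hanotin : a ∉ rest.dropWhile (fun d => d == a) :=
      fun hmem => lt_irrefl a (hgt a hmem)
    have htw : ∀ d ∈ rest.takeWhile (fun d => d == a), d = a := by
      intro d hd
      have := List.mem_takeWhile_imp hd
      simpa using this
    have hsplit := List.takeWhile_append_dropWhile (p := fun d => d == a) (l := rest)
    have hcount_a : (a :: rest).count a =
        1 + (rest.takeWhile (fun d => d == a)).length := by
      rw [List.count_cons_self]
      have hr : rest.count a = (rest.takeWhile (fun d => d == a)).count a
          + (rest.dropWhile (fun d => d == a)).count a := by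
        conv_lhs => rw [← hsplit]
        rw [List.count_append]
      rw [hr]
      have h1 : (rest.takeWhile (fun d => d == a)).count a =
          (rest.takeWhile (fun d => d == a)).length :=
        List.count_eq_length.mpr (fun d hd => (htw d hd).symm ▸ rfl)
      have h2 : (rest.dropWhile (fun d => d == a)).count a = 0 :=
        List.count_eq_zero.mpr hanotin
      omega
    simp only [pvRunsX, List.mem_append, ih hdw]
    by_cases hc : c = a
    · subst hc
      simp only [hanotin, false_and, or_false]
      constructor
      · intro hin
        split at hin
        · rename_i hcond
          refine ⟨List.mem_cons_self, ?_, hcond.2⟩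
          rw [hcount_a]; push_cast; push_cast at hcond; omega
        · simp at hin
      · rintro ⟨-, hcnt, hlow⟩
        rw [hcount_a] at hcnt; push_cast at hcnt
        rw [if_pos ⟨by push_cast; omega, hlow⟩]
        simp
    · have hmemiff : c ∈ a :: rest ↔ c ∈ rest.dropWhile (fun d => d == a) := by
        constructor
        · intro hm
          rcases List.mem_cons.mp hm with h | h
          · exact absurd h hc
          · rw [← hsplit] at h
            rcases List.mem_append.mp h with h | h
            · exact absurd (htw c h) hc
            · exact h
        · intro hm
          exact List.mem_cons_of_mem _ ((List.dropWhile_sublist _).subset hm)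
      have hcnt_eq : (a :: rest).count c = (rest.dropWhile (fun d => d == a)).count c := by
        have hr : rest.count c = (rest.takeWhile (fun d => d == a)).count c
            + (rest.dropWhile (fun d => d == a)).count c := by
          conv_lhs => rw [← hsplit]
          rw [List.count_append]
        have h0 : (rest.takeWhile (fun d => d == a)).count c = 0 :=
          List.count_eq_zero.mpr (fun hm => hc (htw c hm))
        rw [List.count_cons, hr, h0]
        simp [(Ne.symm hc : a ≠ c)]
      constructor
      · rintro (hin | hin)
        · split at hin
          · simp at hin; exact absurd hin hc
          · simp at hin
        · rcases hin with ⟨h1, h2, h3⟩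
          exact ⟨hmemiff.mpr h1, by rw [hcnt_eq]; exact h2, h3⟩
      · rintro ⟨h1, h2, h3⟩
        exact Or.inr ⟨hmemiff.mp h1, by rw [← hcnt_eq]; exact h2, h3⟩

theorem pvRunsSub (x : Int) (t : List Char) : ∀ c ∈ pvRunsX x t, c ∈ t := by
  induction t using pvRunsX.induct with
  | case1 => simp [pvRunsX]
  | case2 a rest ih =>
    simp only [pvRunsX, List.mem_append]
    intro c hc
    rcases hc with hc | hc
    · split at hc
      · simp at hc; simp [hc]
      · simp at hc
    · exact List.mem_cons_of_mem _ ((List.dropWhile_sublist _).subset (ih c hc))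

-- pvRunsX of a sorted list is strictly increasing
theorem pvRunsPairwise (x : Int) (t : List Char) (hs : t.Pairwise (· ≤ ·)) :
    (pvRunsX x t).Pairwise (· < ·) := by
  induction t using pvRunsX.induct with
  | case1 => simp [pvRunsX]
  | case2 a rest ih =>
    rw [List.pairwise_cons] at hs
    have hgt := pvDropGt a rest hs.2 hs.1
    have hdw : (rest.dropWhile (fun d => d == a)).Pairwise (· ≤ ·) :=
      hs.2.sublist (List.dropWhile_sublist _)
    simp only [pvRunsX]
    split
    · rw [List.singleton_append, List.pairwise_cons]
      exact ⟨fun c hc => hgt c (pvRunsSub x _ c hc), ih hdw⟩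
    · rw [List.nil_append]; exact ih hdw

theorem pvMergeSubLeft (as bs : List Char) : ∀ c ∈ pvMergeInter as bs, c ∈ as := by
  induction as, bs using pvMergeInter.induct with
  | case1 x => simp [pvMergeInter]
  | case2 a as => simp [pvMergeInter]
  | case3 as b bs ih =>
    rw [show pvMergeInter (b :: as) (b :: bs) = b :: pvMergeInter as bs from by
      simp [pvMergeInter]]
    intro c hc
    rcases List.mem_cons.mp hc with h' | h'
    · simp [h']
    · exact List.mem_cons_of_mem _ (ih c h')
  | case4 a as b bs h h2 ih =>
    simp only [pvMergeInter, if_neg h, if_pos h2]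
    intro c hc; exact List.mem_cons_of_mem _ (ih c hc)
  | case5 a as b bs h h2 ih =>
    simp only [pvMergeInter, if_neg h, if_neg h2]
    exact ih

theorem pvMergeMem (as bs : List Char) (ha : as.Pairwise (· < ·)) (hb : bs.Pairwise (· < ·))
    (c : Char) : c ∈ pvMergeInter as bs ↔ c ∈ as ∧ c ∈ bs := by
  induction as, bs using pvMergeInter.induct with
  | case1 x => simp [pvMergeInter]
  | case2 a as => simp [pvMergeInter]
  | case3 as b bs ih =>
    rw [List.pairwise_cons] at ha hb
    rw [show pvMergeInter (b :: as) (b :: bs) = b :: pvMergeInter as bs from by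
      simp [pvMergeInter]]
    simp only [List.mem_cons, ih ha.2 hb.2]
    constructor
    · rintro (h | ⟨h1, h2⟩)
      · exact ⟨Or.inl h, Or.inl h⟩
      · exact ⟨Or.inr h1, Or.inr h2⟩
    · rintro ⟨h1 | h1, h2 | h2⟩
      · exact Or.inl h1
      · exact Or.inl h1
      · exact absurd (ha.1 c h1) (by rw [h2]; exact lt_irrefl _)
      · exact Or.inr ⟨h1, h2⟩
  | case4 a as b bs h h2 ih =>
    rw [List.pairwise_cons] at ha
    simp only [pvMergeInter, if_neg h, if_pos h2, ih ha.2 hb, List.mem_cons]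
    constructor
    · rintro ⟨h1, h3⟩; exact ⟨Or.inr h1, h3⟩
    · rintro ⟨h1 | h1, h3⟩
      · rw [List.pairwise_cons] at hb
        rcases h3 with h3 | h3
        · exact absurd (h1.symm.trans h3) h
        · exact absurd (lt_trans h2 (hb.1 c h3)) (by rw [h1]; exact lt_irrefl _)
      · exact ⟨h1, h3⟩
  | case5 a as b bs h h2 ih =>
    rw [List.pairwise_cons] at hb
    have hba : b < a := lt_of_le_of_ne (not_lt.mp h2) (fun e => h e.symm)
    simp only [pvMergeInter, if_neg h, if_neg h2, ih ha hb.2, List.mem_cons]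
    constructor
    · rintro ⟨h1, h3⟩; exact ⟨h1, Or.inr h3⟩
    · rintro ⟨h1, h3 | h3⟩
      · rcases h1 with h1 | h1
        · exact absurd (h3.symm.trans h1) (fun e => h e.symm)
        · rw [List.pairwise_cons] at ha
          exact absurd (lt_trans hba (ha.1 c h1)) (by rw [h3]; exact lt_irrefl _)
      · exact ⟨h1, h3⟩

theorem pvMergePairwise (as bs : List Char) (ha : as.Pairwise (· < ·)) :
    (pvMergeInter as bs).Pairwise (· < ·) := by
  induction as, bs using pvMergeInter.induct with
  | case1 x => simp [pvMergeInter]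
  | case2 a as => simp [pvMergeInter]
  | case3 as b bs ih =>
    rw [List.pairwise_cons] at ha
    rw [show pvMergeInter (b :: as) (b :: bs) = b :: pvMergeInter as bs from by
      simp [pvMergeInter]]
    rw [List.pairwise_cons]
    exact ⟨fun c hc => ha.1 c (pvMergeSubLeft _ _ c hc), ih ha.2⟩
  | case4 a as b bs h h2 ih =>
    rw [List.pairwise_cons] at ha
    simpa only [pvMergeInter, if_neg h, if_pos h2] using ih ha.2
  | case5 a as b bs h h2 ih =>
    simpa only [pvMergeInter, if_neg h, if_neg h2] using ih ha

-- singleton strings compare like their characters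
theorem pvSingletonLt (c d : Char) : String.ofList [c] < String.ofList [d] ↔ c < d := by
  rw [String.lt_iff_toList_lt, String.toList_ofList, String.toList_ofList]
  simp [List.cons_lt_cons_iff]

-- ===== VERDICT (by name: the statement is the Claim_ definition above) =====
theorem bothCountX_spec : Claim_equal_bothCountX := by
  intro s1 s2 x _
  unfold Spec_bothCountX bothCountX bothCountX_alt
  simp only [PySem.Dict.keys_counter]
  rw [pvFoldA (fun i => (PySem.Dict.counter s1.toList).getD i 0 = x ∧ (PySem.Dict.counter s2.toList).getD i 0 = x)
      (fun i => 97 ≤ (i.toNat : Int) ∧ (i.toNat : Int) ≤ 122)]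
  rw [List.nil_append]
  have hsort1 : (PySem.List.sorted s1.toList (fun c => c) false).Pairwise (· ≤ ·) :=
    PySem.List.sorted_pairwise _ _
  have hsort2 : (PySem.List.sorted s2.toList (fun c => c) false).Pairwise (· ≤ ·) :=
    PySem.List.sorted_pairwise _ _
  have hr1 := pvRunsPairwise x _ hsort1
  have hr2 := pvRunsPairwise x _ hsort2
  have hMpw : (pvMergeInter (pvRunsX x (PySem.List.sorted s1.toList (fun c => c) false))
      (pvRunsX x (PySem.List.sorted s2.toList (fun c => c) false))).Pairwise (· < ·) :=
    pvMergePairwise _ _ hr1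
  refine PySem.List.sorted_eq_of_perm_of_pairwise_lt _ _ _ ?_ ?_
  · -- permutation: both lists are nodup with the same members
    refine List.Perm.map _ ((List.perm_ext_iff_of_nodup
      (hMpw.imp (fun h => ne_of_lt h))
      ((PySem.Set.nodup_ofList s1.toList).filter _)).mpr ?_)
    intro c
    rw [pvMergeMem _ _ hr1 hr2, pvRunsMem x _ hsort1, pvRunsMem x _ hsort2]
    have hp1 := PySem.List.sorted_perm s1.toList (fun c => c) false
    have hp2 := PySem.List.sorted_perm s2.toList (fun c => c) false
    rw [PySem.List.mem_sorted, PySem.List.mem_sorted, hp1.count_eq, hp2.count_eq]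
    simp only [List.mem_filter, PySem.Set.mem_ofList, Bool.and_eq_true, decide_eq_true_eq,
      PySem.Dict.getD_counter]
    constructor
    · rintro ⟨⟨hm1, hc1, hlow⟩, hm2, hc2, -⟩
      exact ⟨hm1, ⟨hc1, hc2⟩, (pvCharLe c).mp hlow⟩
    · rintro ⟨hm1, ⟨hc1, hc2⟩, hord⟩
      have hlow := (pvCharLe c).mpr hord
      have hx : (1 : Int) ≤ x := by
        have := List.count_pos_iff.mpr hm1
        omega
      have hm2 : c ∈ s2.toList := List.count_pos_iff.mp (by omega)
      exact ⟨⟨hm1, hc1, hlow⟩, hm2, hc2, hlow⟩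
  · -- strict order on the mapped singletons
    rw [List.pairwise_map]
    exact hMpw.imp (fun h => (pvSingletonLt _ _).mpr h)
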